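-- pv_equiv track=rewrite | github.com/XRPLF/rippled | bin/crypto_conditions_test_gen/conditions.py | bitset_to_tuple
-- ===== SOURCE A (Python) =====
-- def bitset_to_tuple(seq):
--     if seq:
--         result = [0] * (1 + max(seq))
--     else:
--         result = [0]
--     for b in seq:
--         if b >= 32 or b < 0:
--             raise ValueError('Can only set bits between 0 and 31')
--         result[b] = 1
--     return tuple(result)
-- ===== SOURCE B (Python) =====
-- def bitset_to_tuple(seq):
--     mask = 0
--     for b in seq:
--         if b >= 32 or b < 0:
--             raise ValueError('Can only set bits between 0 and 31')
--         mask |= 1 << b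
--     bits = []
--     while mask:
--         bits.append(mask & 1)
--         mask >>= 1
--     return tuple(bits) if bits else (0,)
-- ===== Notes on version B (the rewrite author's own statement) =====
-- stated objective: alternative
-- what changed: B replaces the preallocated list with scatter writes (and the extra max(seq) pass) by an integer bitmask accumulated with OR/shift in one validating pass, then materialises the tuple by peeling the mask bit by bit with shifts, so no list is ever indexed or preallocated.
import Mathlib
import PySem

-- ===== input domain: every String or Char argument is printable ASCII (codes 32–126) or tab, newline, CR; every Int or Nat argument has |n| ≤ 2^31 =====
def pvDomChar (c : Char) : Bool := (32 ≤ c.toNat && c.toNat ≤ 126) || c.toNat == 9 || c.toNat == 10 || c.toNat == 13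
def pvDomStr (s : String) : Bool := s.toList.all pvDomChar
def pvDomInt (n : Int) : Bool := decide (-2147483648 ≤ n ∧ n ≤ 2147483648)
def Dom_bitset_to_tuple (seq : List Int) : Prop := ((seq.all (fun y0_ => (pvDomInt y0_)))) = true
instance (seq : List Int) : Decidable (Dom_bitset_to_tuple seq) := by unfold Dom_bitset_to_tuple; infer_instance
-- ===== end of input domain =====

-- B accumulates an integer bitmask (OR of 1 << b) in one validating pass and then
-- materialises the result by peeling the mask bit by bit, instead of A's
-- preallocated list (sized by a separate max(seq) pass) with scatter writes
-- (objective: alternative).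


-- ===== PORT A =====
-- `result = [0] * (1 + max(seq))` if seq else `[0]`; then `result[b] = 1` for each b.
-- The branch `b >= 32 or b < 0` is where Python raises ValueError: excluded by Pre_,
-- the port leaves the accumulator unchanged there.
def bitset_to_tuple (seq : List Int) : List Int :=
  let result : List Int :=
    match seq with
    | [] => [0]
    | x :: t => PySem.List.pyRepeat [0] (1 + List.foldl max x t)  -- max(seq) = foldl max
  seq.foldl (fun acc b =>
    if b ≥ 32 ∨ b < 0 then acc  -- Python: raise ValueError (outside Pre_)
    else PySem.List.pySetD acc b 1) result

-- ===== PORT B =====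
-- Python's `while mask: bits.append(mask & 1); mask >>= 1` (mask is a nonnegative int
-- here: only bits 0..31 are ever OR-ed in); mask & 1 = m % 2, mask >> 1 = m / 2, exact on Nat.
def pvPeel (m : Nat) : List Int :=
  if m = 0 then [] else ((m % 2 : Nat) : Int) :: pvPeel (m / 2)
  decreasing_by exact Nat.div_lt_self (Nat.pos_of_ne_zero (by assumption)) (by omega)

-- `mask |= 1 << b`: b ≥ 0 in the taken branch, so 1 <<< b.toNat is exact.
def bitset_to_tuple_alt (seq : List Int) : List Int :=
  let mask : Nat := seq.foldl (fun (m : Nat) (b : Int) =>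
    if b ≥ 32 ∨ b < 0 then m  -- Python: raise ValueError (outside Pre_)
    else m ||| (1 <<< b.toNat)) 0
  let bits := pvPeel mask
  if bits.isEmpty then [0] else bits

-- ===== PRECONDITION & SPEC =====
-- A raises ValueError exactly when some element is < 0 or ≥ 32; Pre_ excludes those inputs.
def Pre_bitset_to_tuple (seq : List Int) : Prop := ∀ b ∈ seq, 0 ≤ b ∧ b < 32
instance (seq : List Int) : Decidable (Pre_bitset_to_tuple seq) := by unfold Pre_bitset_to_tuple; infer_instance
def pvWitness_bitset_to_tuple : List Int := [0, 5, 2, 5]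

def Spec_bitset_to_tuple (seq : List Int) (out : List Int) : Prop := out = bitset_to_tuple_alt seq
instance (seq : List Int) (out : List Int) : Decidable (Spec_bitset_to_tuple seq out) := by unfold Spec_bitset_to_tuple; infer_instance

-- ===== CLAIM (what is proved, stated in full; the proofs are below) =====
def Claim_equal_bitset_to_tuple : Prop := ∀ (seq : List Int), Dom_bitset_to_tuple seq → Pre_bitset_to_tuple seq → Spec_bitset_to_tuple seq (bitset_to_tuple seq)

-- ===== LEMMAS AND PROOFS =====

-- A's scatter loop, in set form: length is preserved, entries are a membership test.
theorem foldl_set_length (xs : List Int) (res : List Int) :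
    (xs.foldl (fun acc b => acc.set b.toNat 1) res).length = res.length := by
  induction xs generalizing res with
  | nil => rfl
  | cons b t ih => simpa [List.foldl] using ih (res.set b.toNat 1)

theorem foldl_set_getElem (xs : List Int) (h : ∀ b ∈ xs, 0 ≤ b) (res : List Int)
    (j : Nat) (hj : j < res.length) :
    (xs.foldl (fun acc b => acc.set b.toNat 1) res)[j]'(by rwa [foldl_set_length]) =
      if (j : Int) ∈ xs then 1 else res[j] := by
  induction xs generalizing res with
  | nil => simp
  | cons b t ih =>
    have hb : 0 ≤ b := h b (List.mem_cons_self ..)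
    have ht : ∀ x ∈ t, 0 ≤ x := fun x hx => h x (List.mem_cons_of_mem _ hx)
    have := ih ht (res.set b.toNat 1) (by simpa using hj)
    simp only [List.foldl] at this ⊢
    rw [this]
    by_cases hjt : (j : Int) ∈ t
    · simp [hjt]
    · rw [List.getElem_set]
      by_cases hjb : b.toNat = j
      · have : (j : Int) = b := by omega
        simp [hjb, this]
      · have : (j : Int) ≠ b := by omega
        simp [hjt, this, hjb]

-- B's mask: which bits are set.
theorem mask_testBit (xs : List Int) (init : Nat) (j : Nat) :
    (xs.foldl (fun m b => m ||| (1 <<< b.toNat)) init).testBit j =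
      (init.testBit j || xs.any (fun b => b.toNat == j)) := by
  induction xs generalizing init with
  | nil => simp
  | cons x t ih =>
    simp only [List.foldl, List.any_cons]
    rw [ih]
    simp only [Nat.testBit_or, Nat.shiftLeft_eq, one_mul, Nat.testBit_two_pow]
    by_cases hx : x.toNat = j
    · simp [hx, Bool.or_comm]
    · have hf : (x.toNat == j) = false := by simpa using hx
      simp [hf, hx]

-- the length of the peeled bit list, by the same recursion as pvPeel
def pvLen (m : Nat) : Nat :=
  if m = 0 then 0 else pvLen (m / 2) + 1
  decreasing_by exact Nat.div_lt_self (Nat.pos_of_ne_zero (by assumption)) (by omega)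

theorem pvPeel_eq (m : Nat) :
    pvPeel m = (List.range (pvLen m)).map (fun j => if m.testBit j then (1 : Int) else 0) := by
  induction m using Nat.strong_induction_on with
  | _ m ih =>
    by_cases h : m = 0
    · simp [pvPeel, pvLen, h]
    · rw [pvPeel, pvLen, if_neg h, if_neg h,
        ih (m / 2) (Nat.div_lt_self (Nat.pos_of_ne_zero h) (by omega)),
        List.range_succ_eq_map, List.map_cons, List.map_map]
      congr 1
      · have h2 := Nat.mod_two_eq_zero_or_one m
        rcases h2 with h2 | h2 <;> simp [Nat.testBit_zero, h2]
      · apply List.map_congr_left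
        intro j _
        simp [Function.comp, Nat.testBit_add_one]

theorem pvLen_le_iff (m n : Nat) : pvLen m ≤ n ↔ m < 2 ^ n := by
  induction m using Nat.strong_induction_on generalizing n with
  | _ m ih =>
    by_cases h : m = 0
    · subst h
      have h0 : pvLen 0 = 0 := by rw [pvLen]; rfl
      simp only [h0, Nat.zero_le, true_iff]
      exact Nat.two_pow_pos n
    · rw [pvLen, if_neg h]
      cases n with
      | zero => simp; omega
      | succ k =>
        rw [Nat.succ_le_succ_iff, ih (m / 2) (Nat.div_lt_self (Nat.pos_of_ne_zero h) (by omega)) k,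
          pow_succ]
        omega

-- an OR-fold of values below 2^n stays below 2^n
theorem foldl_or_lt (l : List Int) (n : Nat) (init : Nat) (hinit : init < 2 ^ n)
    (h : ∀ b ∈ l, (1 <<< b.toNat) < 2 ^ n) :
    l.foldl (fun m b => m ||| (1 <<< b.toNat)) init < 2 ^ n := by
  induction l generalizing init with
  | nil => exact hinit
  | cons y s ih =>
    exact ih (init ||| (1 <<< y.toNat))
      (Nat.or_lt_two_pow hinit (h y (List.mem_cons_self ..)))
      (fun b hb => h b (List.mem_cons_of_mem _ hb))

-- max(seq) is an element of seq
theorem foldl_max_mem_cons (x : Int) (t : List Int) : List.foldl max x t ∈ x :: t := by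
  rcases PySem.List.foldl_max_mem t x with h | h
  · rw [h]; exact List.mem_cons_self ..
  · exact List.mem_cons_of_mem _ h

-- ===== VERDICT (by name: the statement is the Claim_ definition above) =====
theorem bitset_to_tuple_spec : Claim_equal_bitset_to_tuple := by
  intro seq _ hpre
  unfold Spec_bitset_to_tuple bitset_to_tuple bitset_to_tuple_alt
  -- drop the never-taken raise branch from both loops
  rw [PySem.List.foldl_congr_mem seq
    (fun (acc : List Int) b => if b ≥ 32 ∨ b < 0 then acc else PySem.List.pySetD acc b 1)
    (fun (acc : List Int) b => acc.set b.toNat 1)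
    _
    (by intro acc x hx
        have hx' := hpre x hx
        simp [show ¬(x ≥ 32 ∨ x < 0) by omega, PySem.List.pySetD_of_nonneg _ _ hx'.1])]
  rw [PySem.List.foldl_congr_mem seq
    (fun (m : Nat) b => if b ≥ 32 ∨ b < 0 then m else m ||| (1 <<< b.toNat))
    (fun (m : Nat) b => m ||| (1 <<< b.toNat))
    0
    (by intro acc x hx
        have hx' := hpre x hx
        simp [show ¬(x ≥ 32 ∨ x < 0) by omega])]
  cases seq with
  | nil =>
    have h0 : pvPeel 0 = [] := by rw [pvPeel]; rfl
    simp [h0]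
  | cons x t =>
    have hnn : ∀ b ∈ x :: t, 0 ≤ b := fun b hb => (hpre b hb).1
    have hx : 0 ≤ x := hnn x (List.mem_cons_self ..)
    have hmax := PySem.List.le_foldl_max t x
    set M := List.foldl max x t with hM
    have hMnn : 0 ≤ M := le_trans hx hmax.1
    set mask := (x :: t).foldl (fun m b => m ||| (1 <<< b.toNat)) 0 with hmask
    -- membership form of the mask's bits (all elements are nonnegative)
    have hbit : ∀ j : Nat, mask.testBit j = ((j : Int) ∈ x :: t : Bool) := by
      intro j
      rw [hmask, mask_testBit]
      simp only [Nat.zero_testBit, Bool.false_or]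
      by_cases hj : (j : Int) ∈ x :: t
      · rw [decide_eq_true hj]
        exact List.any_eq_true.2 ⟨(j : Int), hj, by simp⟩
      · rw [decide_eq_false hj]
        refine List.any_eq_false.2 ?_
        intro b hb
        have hb0 := hnn b hb
        have hne : b.toNat ≠ j := fun hbj => hj (by rw [show (j : Int) = b by omega]; exact hb)
        simpa using hne
    -- the mask's bit M.toNat is set, and no bit ≥ M.toNat + 1 is
    have hMbit : mask.testBit M.toNat = true := by
      rw [hbit]
      have := foldl_max_mem_cons x t
      rw [← hM] at this
      simpa [Int.toNat_of_nonneg hMnn] using this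
    have hlen : pvLen mask = M.toNat + 1 := by
      have hub : pvLen mask ≤ M.toNat + 1 := by
        rw [pvLen_le_iff, hmask]
        refine foldl_or_lt _ _ _ (Nat.two_pow_pos _) ?_
        intro b hb
        rw [Nat.shiftLeft_eq, one_mul]
        have hble : b ≤ M := by
          rcases List.mem_cons.1 hb with rfl | hb'
          · exact hmax.1
          · exact hmax.2 b hb'
        have hb0 := hnn b hb
        exact Nat.pow_lt_pow_right (by omega) (by omega)
      have hlb : ¬ pvLen mask ≤ M.toNat := by
        rw [pvLen_le_iff, not_lt]
        exact Nat.ge_two_pow_of_testBit hMbit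
      omega
    -- now compare the two lists elementwise
    simp only [pvPeel_eq, hlen]
    have hne : ¬ (List.map (fun j => if mask.testBit j then (1 : Int) else 0)
        (List.range (M.toNat + 1))).isEmpty = true := by
      simp [List.isEmpty_iff, List.range_succ]
    rw [if_neg hne]
    rw [PySem.List.pyRepeat_singleton]
    have htn : (1 + M).toNat = M.toNat + 1 := by omega
    apply List.ext_getElem
    · rw [foldl_set_length]
      simp only [List.length_replicate, List.length_map, List.length_range]
      omega
    · intro j h1 h2
      rw [foldl_set_getElem (x :: t) hnn _ j (by simpa [foldl_set_length] using h1)]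
      simp only [List.getElem_map, List.getElem_range, List.getElem_replicate]
      rw [hbit]
      by_cases hj : (j : Int) ∈ x :: t <;> simp [hj]
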